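-- pv_equiv track=rewrite | github.com/ja153903/start-thinking-more | advent_of_code/yr2015/day05/main.py | has_forbidden_char
-- ===== SOURCE A (Python) =====
-- def has_forbidden_char(word: str) -> bool:
--     for i in range(1, len(word)):
--         if word[i - 1] == "a" and word[i] == "b":
--             return True
--         if word[i - 1] == "c" and word[i] == "d":
--             return True
--         if word[i - 1] == "p" and word[i] == "q":
--             return True
--         if word[i - 1] == "x" and word[i] == "y":
--             return True
--     return False
-- ===== SOURCE B (Python) =====
-- def has_forbidden_char(word: str) -> bool:
--     return any(sub in word for sub in ("ab", "cd", "pq", "xy"))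
-- ===== Notes on version B (the rewrite author's own statement) =====
-- stated objective: idiomatic
-- what changed: Replaces the index-based scan with four hand-written branch checks by an any() over the forbidden patterns using Python's substring test.
import Mathlib
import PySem

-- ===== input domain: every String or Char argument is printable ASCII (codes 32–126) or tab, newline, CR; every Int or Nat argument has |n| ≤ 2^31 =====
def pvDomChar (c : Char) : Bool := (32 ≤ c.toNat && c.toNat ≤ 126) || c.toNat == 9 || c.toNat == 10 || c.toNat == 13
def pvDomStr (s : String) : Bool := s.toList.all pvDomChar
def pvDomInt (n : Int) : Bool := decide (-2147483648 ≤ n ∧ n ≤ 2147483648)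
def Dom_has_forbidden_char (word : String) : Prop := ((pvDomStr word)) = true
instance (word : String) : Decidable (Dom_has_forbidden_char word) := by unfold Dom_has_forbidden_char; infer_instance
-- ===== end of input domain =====

-- ===== PORT A =====
-- A scans positions i = 1 .. len-1 checking word[i-1]/word[i] against four pairs;
-- ported as the same left-to-right scan over adjacent characters of word.toList.
def pvScanA : List Char → Bool
  | a :: b :: rest =>
    if a = 'a' ∧ b = 'b' then true
    else if a = 'c' ∧ b = 'd' then true
    else if a = 'p' ∧ b = 'q' then true
    else if a = 'x' ∧ b = 'y' then true
    else pvScanA (b :: rest)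
  | _ => false

def has_forbidden_char (word : String) : Bool := pvScanA word.toList

-- ===== PORT B =====
-- B: any(sub in word for sub in ("ab", "cd", "pq", "xy"))
def has_forbidden_char_alt (word : String) : Bool :=
  ["ab", "cd", "pq", "xy"].any (fun sub => PySem.Str.isIn sub word)

-- ===== PRECONDITION & SPEC =====
def Spec_has_forbidden_char (word : String) (out : Bool) : Prop := out = has_forbidden_char_alt word
instance (word : String) (out : Bool) : Decidable (Spec_has_forbidden_char word out) := by unfold Spec_has_forbidden_char; infer_instance

-- ===== CLAIM (what is proved, stated in full; the proofs are below) =====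
def Claim_equal_has_forbidden_char : Prop := ∀ (word : String), Dom_has_forbidden_char word → Spec_has_forbidden_char word (has_forbidden_char word)

-- ===== LEMMAS AND PROOFS =====

-- ===== VERDICT (by name: the statement is the Claim_ definition above) =====
theorem pair_infix_cons (x y a b : Char) (rest : List Char) :
    [x, y] <:+: a :: b :: rest ↔ (a = x ∧ b = y) ∨ [x, y] <:+: b :: rest := by
  rw [List.infix_cons_iff]
  simp only [List.cons_prefix_cons, List.nil_prefix, and_true]
  constructor
  · rintro (⟨h1, h2⟩ | h) <;> [exact Or.inl ⟨h1.symm, h2.symm⟩; exact Or.inr h]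
  · rintro (⟨h1, h2⟩ | h) <;> [exact Or.inl ⟨h1.symm, h2.symm⟩; exact Or.inr h]

set_option maxHeartbeats 1000000 in
theorem pvScanA_iff (cs : List Char) :
    pvScanA cs = true ↔
      (['a','b'] <:+: cs ∨ ['c','d'] <:+: cs ∨ ['p','q'] <:+: cs ∨ ['x','y'] <:+: cs) := by
  fun_induction pvScanA cs with
  | case1 a b rest h1 =>
    simp [h1]
    exact Or.inl ⟨[], rest, by simp⟩
  | case2 a b rest h1 h2 =>
    simp [h2]
    exact Or.inr (Or.inl ⟨[], rest, by simp⟩)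
  | case3 a b rest h1 h2 h3 =>
    simp [h3]
    exact Or.inr (Or.inr (Or.inl ⟨[], rest, by simp⟩))
  | case4 a b rest h1 h2 h3 h4 =>
    simp [h4]
    exact Or.inr (Or.inr (Or.inr ⟨[], rest, by simp⟩))
  | case5 a b rest h1 h2 h3 h4 ih =>
    simp only [pair_infix_cons, ih]
    tauto
  | case6 cs h =>
    match cs, h with
    | [], _ => simp
    | [c], _ => simp [List.infix_cons_iff, List.cons_prefix_cons]
    | a :: b :: rest, h => exact absurd rfl (fun hh => h a b rest hh)

theorem has_forbidden_char_spec : Claim_equal_has_forbidden_char := by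
  intro word _
  unfold Spec_has_forbidden_char has_forbidden_char has_forbidden_char_alt
  simp only [List.any, Bool.or_false]
  rw [Bool.eq_iff_iff]
  simp [PySem.Chars.isIn_iff_infix, pvScanA_iff]
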